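-- pv_equiv track=rewrite | github.com/NaLuxis/Air | air08.py | fusion_split
-- ===== SOURCE A (Python) =====
-- from typing import List
--
-- def fusion_split(list_to_split: List[str]) -> List[List[int]]:
--
--     first_list = []
--     second_list = []
--
--     fusion = False
--
--     for element in list_to_split:
--
--         if element.lstrip("+-").isdigit() and not fusion:
--             first_list.append(int(element))
--
--         if element.lstrip("+-").isdigit() and fusion:
--             second_list.append(int(element))
--
--         if not element.isdigit():
--             fusion = True
--
--     return [first_list, second_list]
-- ===== SOURCE B (Python) =====
-- from typing import List
--
-- def fusion_split(list_to_split: List[str]) -> List[List[int]]: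
--     # boundary: first element that is not purely digits (divider); else past the end
--     split_at = next((i for i, e in enumerate(list_to_split) if not e.isdigit()),
--                     len(list_to_split))
--
--     def to_ints(chunk):
--         return [int(e) for e in chunk if e.lstrip("+-").isdigit()]
--
--     return [to_ints(list_to_split[:split_at + 1]),
--             to_ints(list_to_split[split_at + 1:])]
-- ===== Notes on version B (the rewrite author's own statement) =====
-- stated objective: simpler
-- what changed: Replaces A's single interleaved pass with a mutable fusion flag by a boundary-finding scan (first non-digit element) followed by two independent filtered int-conversions of the slices before/after the boundary.
import Mathlib
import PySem

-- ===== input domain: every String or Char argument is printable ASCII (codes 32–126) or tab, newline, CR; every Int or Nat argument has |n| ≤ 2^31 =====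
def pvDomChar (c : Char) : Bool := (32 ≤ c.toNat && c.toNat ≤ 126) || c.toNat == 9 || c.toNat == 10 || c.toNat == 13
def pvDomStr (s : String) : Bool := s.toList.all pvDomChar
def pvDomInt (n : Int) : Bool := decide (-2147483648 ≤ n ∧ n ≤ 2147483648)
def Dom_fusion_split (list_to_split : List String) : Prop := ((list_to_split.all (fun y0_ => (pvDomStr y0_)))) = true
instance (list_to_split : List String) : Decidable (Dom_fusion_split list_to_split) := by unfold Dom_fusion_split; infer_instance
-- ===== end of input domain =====

-- B replaces A's single interleaved pass with a mutable flag by a boundary-finding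
-- scan followed by two independent filtered conversions of the slices (objective: simpler).

-- shared helpers: the Python expressions both sources use verbatim
-- e.lstrip("+-").isdigit() — lstrip with a chars argument is ported by hand as
-- dropWhile over the sign set (exact: Python removes leading chars from the set)
def sdGuard (e : String) : Bool :=
  PySem.Chars.strIsdigit (e.toList.dropWhile (fun c => c == '+' || c == '-'))

-- int(e); Pre_fusion_split excludes the inputs where int raises (ofStr? = none)
def intOf (e : String) : Int := (PySem.Int.ofStr? e).getD 0

-- ===== PORT A =====
def fusion_split (list_to_split : List String) : List (List Int) :=
  let st := list_to_split.foldl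
    (fun (st : List Int × List Int × Bool) element =>
      let first := if sdGuard element && !st.2.2 then st.1 ++ [intOf element] else st.1
      let second := if sdGuard element && st.2.2 then st.2.1 ++ [intOf element] else st.2.1
      let fusion := if !(PySem.Str.strIsdigit element) then true else st.2.2
      (first, second, fusion))
    ([], [], false)
  [st.1, st.2.1]

-- ===== PORT B =====
-- [int(e) for e in chunk if e.lstrip("+-").isdigit()]
def toInts (chunk : List String) : List Int := (chunk.filter sdGuard).map intOf

def fusion_split_alt (list_to_split : List String) : List (List Int) :=
  let split_at : Nat :=
    (list_to_split.findIdx? (fun e => !(PySem.Str.strIsdigit e))).getD list_to_split.length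
  [toInts (PySem.List.slice list_to_split none (some ((split_at : Int) + 1))),
   toInts (PySem.List.slice list_to_split (some ((split_at : Int) + 1)) none)]

-- ===== PRECONDITION & SPEC =====
-- Pre_ excludes exactly the inputs on which Python A raises ValueError: an element whose
-- lstrip("+-") is all digits but which carries more than one leading sign (e.g. "++5").
def Pre_fusion_split (list_to_split : List String) : Prop :=
  ∀ e ∈ list_to_split, sdGuard e = true →
    (e.toList.takeWhile (fun c => c == '+' || c == '-')).length ≤ 1
instance (list_to_split : List String) : Decidable (Pre_fusion_split list_to_split) := by
  unfold Pre_fusion_split; infer_instance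
def pvWitness_fusion_split : List String := ["1", "+2", "stop", "-3", "x"]

def Spec_fusion_split (list_to_split : List String) (out : List (List Int)) : Prop := out = fusion_split_alt list_to_split
instance (list_to_split : List String) (out : List (List Int)) : Decidable (Spec_fusion_split list_to_split out) := by unfold Spec_fusion_split; infer_instance

-- ===== CLAIM (what is proved, stated in full; the proofs are below) =====
def Claim_equal_fusion_split : Prop := ∀ (list_to_split : List String), Dom_fusion_split list_to_split → Pre_fusion_split list_to_split → Spec_fusion_split list_to_split (fusion_split list_to_split)

-- ===== LEMMAS AND PROOFS =====

-- A's loop body, named for the proofs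
def stepA (st : List Int × List Int × Bool) (element : String) : List Int × List Int × Bool :=
  let first := if sdGuard element && !st.2.2 then st.1 ++ [intOf element] else st.1
  let second := if sdGuard element && st.2.2 then st.2.1 ++ [intOf element] else st.2.1
  let fusion := if !(PySem.Str.strIsdigit element) then true else st.2.2
  (first, second, fusion)

lemma fusion_split_eq_foldl (l : List String) :
    fusion_split l = [(l.foldl stepA ([], [], false)).1, (l.foldl stepA ([], [], false)).2.1] := rfl

-- once fusion is true everything signed-digit goes to the second list
lemma foldl_fusion_true (l : List String) (f sec : List Int) :
    l.foldl stepA (f, sec, true) = (f, sec ++ toInts l, true) := by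
  induction l generalizing sec with
  | nil => simp [toInts]
  | cons e rest ih =>
      simp only [List.foldl_cons, stepA]
      by_cases h : sdGuard e = true <;>
        simp [h, ih, toInts]

-- a purely-digit element is nonempty, starts with a digit, hence passes the signed guard
lemma sdGuard_of_isdigit (e : String) (h : PySem.Str.strIsdigit e = true) : sdGuard e = true := by
  rw [PySem.Str.strIsdigit_eq] at h
  unfold sdGuard
  unfold PySem.Chars.strIsdigit at *
  cases hc : e.toList with
  | nil => simp [hc] at h
  | cons c cs =>
      rw [hc] at h
      simp only [List.all_cons, Bool.and_eq_true, List.isEmpty_cons, Bool.not_false,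
        Bool.true_and] at h
      have hd : PySem.Chars.isdigit c = true := h.1
      have : (c == '+' || c == '-') = false := by
        unfold PySem.Chars.isdigit at hd
        simp only [Bool.and_eq_true, decide_eq_true_eq] at hd
        simp only [Bool.or_eq_false_iff, beq_eq_false_iff_ne]
        constructor <;> rintro rfl <;> simp_all
      simp [this, h.1, h.2]

-- main invariant: the fold from fusion=false splits at the first non-digit element
lemma foldl_main (l : List String) (f : List Int) :
    l.foldl stepA (f, [], false) =
      (f ++ toInts (l.take (((l.findIdx? (fun e => !(PySem.Str.strIsdigit e))).getD l.length) + 1)),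
       toInts (l.drop (((l.findIdx? (fun e => !(PySem.Str.strIsdigit e))).getD l.length) + 1)),
       (l.findIdx? (fun e => !(PySem.Str.strIsdigit e))).isSome) := by
  induction l generalizing f with
  | nil => simp [toInts]
  | cons e rest ih =>
      by_cases hd : PySem.Str.strIsdigit e = true
      · have hg := sdGuard_of_isdigit e hd
        have hdc : PySem.Chars.strIsdigit e.toList = true := by
          rwa [PySem.Str.strIsdigit_eq] at hd
        simp only [List.foldl_cons, stepA, hg, hd, Bool.not_true, Bool.and_false,
          Bool.and_true, Bool.not_false, Bool.false_eq_true, if_false, if_true]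
        rw [ih (f ++ [intOf e]), List.findIdx?_cons]
        cases hfi : rest.findIdx? (fun e => !(PySem.Str.strIsdigit e)) with
        | none => simp [hdc, List.take_succ_cons, List.drop_succ_cons, toInts,
            hg, List.append_assoc]
        | some i => simp [hdc, List.take_succ_cons, List.drop_succ_cons, toInts,
            hg, List.append_assoc]
      · have hd' : PySem.Str.strIsdigit e = false := by simpa using hd
        have hdc : PySem.Chars.strIsdigit e.toList = false := by
          rwa [PySem.Str.strIsdigit_eq] at hd'
        simp only [List.foldl_cons, stepA, hd', Bool.not_false, Bool.and_true,
          Bool.and_false, Bool.false_eq_true, if_true, if_false]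
        rw [foldl_fusion_true]
        rw [List.findIdx?_cons]
        simp only [hd', Bool.not_false]
        by_cases hg : sdGuard e = true <;>
          simp [hg, toInts]

-- ===== VERDICT (by name: the statement is the Claim_ definition above) =====
theorem fusion_split_spec : Claim_equal_fusion_split := by
  intro l _ _
  unfold Spec_fusion_split fusion_split_alt
  rw [fusion_split_eq_foldl, foldl_main l []]
  have h1 : (0:Int) ≤ ((((l.findIdx? (fun e => !(PySem.Str.strIsdigit e))).getD l.length) : Int) + 1) := by positivity
  have htn : (((((l.findIdx? (fun e => !(PySem.Str.strIsdigit e))).getD l.length) : Int) + 1)).toNat = ((l.findIdx? (fun e => !(PySem.Str.strIsdigit e))).getD l.length) + 1 := by omega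
  have e1 : PySem.List.slice l none (some ((((l.findIdx? (fun e => !(PySem.Str.strIsdigit e))).getD l.length) : Int) + 1)) = l.take (((l.findIdx? (fun e => !(PySem.Str.strIsdigit e))).getD l.length) + 1) := by
    rw [PySem.List.slice_to l h1, htn]
  have e2 : PySem.List.slice l (some ((((l.findIdx? (fun e => !(PySem.Str.strIsdigit e))).getD l.length) : Int) + 1)) none = l.drop (((l.findIdx? (fun e => !(PySem.Str.strIsdigit e))).getD l.length) + 1) := by
    rw [PySem.List.slice_from l h1, htn]
  simp only [e1, e2, List.nil_append]
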